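-- pv_equiv track=rewrite | github.com/eilamshapira/GLEE | interface.py | generate_model_pairs
-- ===== SOURCE A (Python) =====
-- def generate_model_pairs(models, runs_per_model):
--     """Generate model pairs for the specified runs per model."""
--     model_pairs = []
--
--     def get_model_2():
--         while True:
--             for model in models:
--                 yield model
--     model2_gen = get_model_2()
--
--     for model1 in models:
--         for _ in range(runs_per_model):
--             model2 = next(model2_gen)
--             model_pairs.append((model1, model2))
--
--     return model_pairs
-- ===== SOURCE B (Python) =====
-- def generate_model_pairs(models, runs_per_model):
--     """Generate model pairs for the specified runs per model."""
--     n = len(models)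
--     return [(models[i // runs_per_model], models[i % n])
--             for i in range(n * runs_per_model)]
-- ===== Notes on version B (the rewrite author's own statement) =====
-- stated objective: simpler
-- what changed: Replaces the nested loops plus an infinite cycling generator with a single flat list comprehension over a global index, recovering model1 by i // runs_per_model and the cycling model2 by i % len(models).
import Mathlib
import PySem

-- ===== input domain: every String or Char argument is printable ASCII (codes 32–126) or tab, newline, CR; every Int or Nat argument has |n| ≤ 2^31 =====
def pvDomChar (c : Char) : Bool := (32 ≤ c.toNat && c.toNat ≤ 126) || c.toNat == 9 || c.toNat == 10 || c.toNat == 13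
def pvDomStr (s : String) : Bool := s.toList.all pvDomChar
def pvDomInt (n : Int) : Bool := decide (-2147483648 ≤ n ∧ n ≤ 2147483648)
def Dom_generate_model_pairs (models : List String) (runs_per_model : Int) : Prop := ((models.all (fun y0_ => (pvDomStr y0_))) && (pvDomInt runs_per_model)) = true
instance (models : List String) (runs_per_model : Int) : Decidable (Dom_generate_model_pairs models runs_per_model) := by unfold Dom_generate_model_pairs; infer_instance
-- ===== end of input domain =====

-- B replaces A's nested loops + infinite cycling generator with one flat map over a
-- global index, using i // runs_per_model and i % len(models); objective: simpler.


-- ===== PORT A =====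
-- the cycling generator is ported as a Nat counter k; next() = models[k % len(models)]
def generate_model_pairs (models : List String) (runs_per_model : Int) : List (String × String) :=
  let n := models.length
  (models.foldl
    (fun (st : List (String × String) × Nat) model1 =>
      (PySem.List.pyRange 0 runs_per_model 1).foldl
        (fun (st2 : List (String × String) × Nat) _ =>
          (st2.1 ++ [(model1, models.getD (st2.2 % n) "")], st2.2 + 1)) st)
    ([], 0)).1

-- ===== PORT B =====
def generate_model_pairs_alt (models : List String) (runs_per_model : Int) : List (String × String) :=
  let n : Int := models.length
  (PySem.List.pyRange 0 (n * runs_per_model) 1).map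
    (fun i =>
      (PySem.List.pyGetD models (PySem.Int.floordiv i runs_per_model) "",
       PySem.List.pyGetD models (PySem.Int.mod i n) ""))

-- ===== PRECONDITION & SPEC =====
def Spec_generate_model_pairs (models : List String) (runs_per_model : Int) (out : List (String × String)) : Prop := out = generate_model_pairs_alt models runs_per_model
instance (models : List String) (runs_per_model : Int) (out : List (String × String)) : Decidable (Spec_generate_model_pairs models runs_per_model out) := by unfold Spec_generate_model_pairs; infer_instance

-- ===== CLAIM (what is proved, stated in full; the proofs are below) =====
def Claim_equal_generate_model_pairs : Prop := ∀ (models : List String) (runs_per_model : Int), Dom_generate_model_pairs models runs_per_model → Spec_generate_model_pairs models runs_per_model (generate_model_pairs models runs_per_model)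

-- ===== LEMMAS AND PROOFS =====

-- proof-only helper: block decomposition of A's accumulator
def pvBig (models : List String) (rt n : Nat) : List String → Nat → List (String × String)
  | [], _ => []
  | m :: ms, k =>
      (List.range rt).map (fun j => (m, models.getD ((k + j) % n) "")) ++
        pvBig models rt n ms (k + rt)

theorem pv_inner (models : List String) (n : Nat) (m1 : String) :
    ∀ (l : List Int) (acc : List (String × String)) (k : Nat),
      l.foldl (fun (st2 : List (String × String) × Nat) _ =>
          (st2.1 ++ [(m1, models.getD (st2.2 % n) "")], st2.2 + 1)) (acc, k)
        = (acc ++ (List.range l.length).map (fun j => (m1, models.getD ((k + j) % n) "")),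
           k + l.length) := by
  intro l
  induction l with
  | nil => intro acc k; simp
  | cons a l ih =>
      intro acc k
      simp only [List.foldl_cons, ih, List.length_cons, List.range_succ_eq_map,
        List.map_cons, List.map_map, Prod.mk.injEq]
      refine ⟨?_, by omega⟩
      rw [List.append_assoc]
      congr 1
      simp only [List.cons_append, List.nil_append]
      congr 1
      apply List.map_congr_left
      intro j _
      have e : k + (j + 1) = k + 1 + j := by omega
      simp [Function.comp, e]

theorem pv_outer (models : List String) (runs_per_model : Int) :
    ∀ (ms : List String) (acc : List (String × String)) (k : Nat),
      ms.foldl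
        (fun (st : List (String × String) × Nat) model1 =>
          (PySem.List.pyRange 0 runs_per_model 1).foldl
            (fun (st2 : List (String × String) × Nat) _ =>
              (st2.1 ++ [(model1, models.getD (st2.2 % models.length) "")], st2.2 + 1)) st)
        (acc, k)
        = (acc ++ pvBig models runs_per_model.toNat models.length ms k,
           k + ms.length * runs_per_model.toNat) := by
  intro ms
  induction ms with
  | nil => intro acc k; simp [pvBig]
  | cons m ms ih =>
      intro acc k
      have hlen : (PySem.List.pyRange 0 runs_per_model 1).length = runs_per_model.toNat := by
        rw [PySem.List.length_pyRange_one]; omega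
      simp only [List.foldl_cons]
      rw [pv_inner models models.length m (PySem.List.pyRange 0 runs_per_model 1) acc k, hlen,
        ih]
      simp only [pvBig, List.append_assoc, Prod.mk.injEq, List.length_cons,
        Nat.succ_mul]
      exact ⟨by trivial, by ring⟩

theorem pvBig_length (models : List String) (rt n : Nat) :
    ∀ (ms : List String) (k : Nat), (pvBig models rt n ms k).length = ms.length * rt := by
  intro ms
  induction ms with
  | nil => intro k; simp [pvBig]
  | cons m ms ih => intro k; simp [pvBig, ih]; ring

theorem pvBig_getElem (models : List String) (rt n : Nat) :
    ∀ (ms : List String) (k i : Nat) (h : i < ms.length * rt),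
      (pvBig models rt n ms k)[i]'(by rw [pvBig_length]; exact h)
        = (ms.getD (i / rt) "", models.getD ((k + i) % n) "") := by
  intro ms
  induction ms with
  | nil => intro k i h; simp at h
  | cons m ms ih =>
      intro k i h
      have h' : i < ms.length * rt + rt := by
        simpa only [List.length_cons, Nat.succ_mul] using h
      have hrt : 0 < rt := Nat.pos_of_ne_zero (by rintro rfl; simp at h')
      by_cases hi : i < rt
      · simp only [pvBig]
        rw [List.getElem_append_left (by simpa using hi)]
        simp [Nat.div_eq_of_lt hi]
      · have hle : rt ≤ i := Nat.le_of_not_lt hi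
        have h2 : i - rt < ms.length * rt := by omega
        simp only [pvBig]
        rw [List.getElem_append_right (by simpa using hle)]
        have hlen : ((List.range rt).map
            (fun j => (m, models.getD ((k + j) % n) ""))).length = rt := by simp
        simp only [hlen]
        rw [ih (k + rt) (i - rt) h2]
        have hdiv : i / rt = (i - rt) / rt + 1 := by
          conv_lhs => rw [show i = (i - rt) + rt from by omega]
          rw [Nat.add_div_right _ hrt]
        rw [hdiv]
        have hk : k + rt + (i - rt) = k + i := by omega
        rw [hk]
        rfl

-- ===== VERDICT (by name: the statement is the Claim_ definition above) =====
theorem generate_model_pairs_spec : Claim_equal_generate_model_pairs := by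
  intro models r _
  unfold Spec_generate_model_pairs generate_model_pairs generate_model_pairs_alt
  simp only []
  rw [pv_outer models r models [] 0]
  simp only [List.nil_append]
  set n := models.length with hn
  set rt := r.toNat with hrt
  have htot : ((n : Int) * r).toNat = n * rt := by
    by_cases hle : r ≤ 0
    · have h1 : (n : Int) * r ≤ 0 := mul_nonpos_of_nonneg_of_nonpos (by positivity) hle
      have h2 : rt = 0 := by omega
      have h3 : ((n : Int) * r).toNat = 0 := by omega
      simp [h2, h3]
    · have hpos : 0 < r := by omega
      have h4 : (n : Int) * r = ((n * rt : Nat) : Int) := by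
        push_cast
        rw [Int.toNat_of_nonneg (le_of_lt hpos)]
      rw [h4, Int.toNat_natCast]

  rw [PySem.List.pyRange_one]
  simp only [sub_zero, htot]
  apply List.ext_getElem
  · simp [pvBig_length]
    try exact Or.inl hn.symm
  · intro i h1 h2
    rw [pvBig_getElem models rt n models 0 i (by rwa [pvBig_length] at h1)]
    have hi : i < n * rt := by simpa using h2
    have hrtpos : 0 < rt := Nat.pos_of_ne_zero (by rintro h0; rw [h0, Nat.mul_zero] at hi; omega)
    have hr : r = (rt : Int) := by omega
    simp only [List.getElem_map, List.getElem_range, zero_add]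
    rw [hr, PySem.Int.floordiv_natCast, PySem.Int.mod_natCast]
    simp only [PySem.List.pyGetD_natCast]
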